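-- pv_equiv track=rewrite | github.com/bmrogers2022/PythonProjects | WordleSolver/wordFilter.py | idealGuesses
-- ===== SOURCE A (Python) =====
-- def idealGuesses(words):
--     used = []
--     for letter in words:
--         if letter in used:
--             return False
--         else:
--             used.append(letter)
--     return True
-- ===== SOURCE B (Python) =====
-- def idealGuesses(words):
--     return len(set(words)) == len(words)
-- ===== Notes on version B (the rewrite author's own statement) =====
-- stated objective: idiomatic
-- what changed: Replaces the explicit scan with an incrementally grown list of seen letters and early return by a one-line cardinality check: build the set of letters once and compare its size to the string length.
import Mathlib
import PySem

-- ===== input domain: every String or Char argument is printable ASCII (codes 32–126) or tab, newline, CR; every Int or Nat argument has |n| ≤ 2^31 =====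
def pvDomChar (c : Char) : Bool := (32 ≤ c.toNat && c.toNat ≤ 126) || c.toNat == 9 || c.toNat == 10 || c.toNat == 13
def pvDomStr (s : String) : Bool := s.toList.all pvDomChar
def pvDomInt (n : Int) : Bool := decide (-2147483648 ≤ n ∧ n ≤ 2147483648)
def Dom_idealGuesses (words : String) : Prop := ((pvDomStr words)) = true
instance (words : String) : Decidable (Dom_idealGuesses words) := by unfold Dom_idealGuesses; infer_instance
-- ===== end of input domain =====

-- B replaces A's per-letter membership scan with early return by a single set-size vs length comparison (idiomatic).

-- ===== PORT A =====
-- the for-loop with the growing list of seen letters and the early 'return False'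
def idealGuessesLoop : List Char → List Char → Bool
  | [], _ => true
  | c :: rest, used => if used.contains c then false else idealGuessesLoop rest (used ++ [c])

def idealGuesses (words : String) : Bool :=
  idealGuessesLoop words.toList []

-- ===== PORT B =====
-- len(set(words)) == len(words)
def idealGuesses_alt (words : String) : Bool :=
  PySem.Set.len (PySem.Set.ofList words.toList) == PySem.Str.len words

-- ===== PRECONDITION & SPEC =====
def Spec_idealGuesses (words : String) (out : Bool) : Prop := out = idealGuesses_alt words
instance (words : String) (out : Bool) : Decidable (Spec_idealGuesses words out) := by unfold Spec_idealGuesses; infer_instance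

-- ===== CLAIM (what is proved, stated in full; the proofs are below) =====
def Claim_equal_idealGuesses : Prop := ∀ (words : String), Dom_idealGuesses words → Spec_idealGuesses words (idealGuesses words)

-- ===== LEMMAS AND PROOFS =====

theorem length_foldl_add_le (l s : List Char) :
    (l.foldl PySem.Set.add s).length ≤ s.length + l.length := by
  induction l generalizing s with
  | nil => simp
  | cons c rest ih =>
    simp only [List.foldl_cons]
    refine le_trans (ih _) ?_
    by_cases h : c ∈ s
    · simp [PySem.Set.add, h]
    · simp [PySem.Set.add, h]; omega

theorem loop_eq_card (l s : List Char) :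
    idealGuessesLoop l s = ((l.foldl PySem.Set.add s).length == s.length + l.length) := by
  induction l generalizing s with
  | nil => simp [idealGuessesLoop]
  | cons c rest ih =>
    simp only [idealGuessesLoop, List.foldl_cons]
    by_cases h : c ∈ s
    · have hadd : PySem.Set.add s c = s := by simp [PySem.Set.add, h]
      have hc : s.contains c = true := by simpa using h
      rw [hadd, if_pos hc]
      have := length_foldl_add_le rest s
      have hne : ¬ (rest.foldl PySem.Set.add s).length = s.length + (rest.length + 1) := by
        omega
      simp [hne]
    · have hadd : PySem.Set.add s c = s ++ [c] := by simp [PySem.Set.add, h]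
      have hc : ¬ s.contains c = true := by simpa using h
      rw [hadd, if_neg hc, ih]
      simp
      omega

-- ===== VERDICT (by name: the statement is the Claim_ definition above) =====
theorem idealGuesses_spec : Claim_equal_idealGuesses := by
  intro words _
  unfold Spec_idealGuesses idealGuesses idealGuesses_alt
  rw [loop_eq_card]
  simp [PySem.Set.len, PySem.Str.len, PySem.Set.ofList]
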